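-- pv_equiv track=rewrite | github.com/YunzheXu/Stock-Price-Prediction-Based-On-News-Title | Exploratory_Analysis.py | count_token
-- ===== SOURCE A (Python) =====
-- from string import punctuation
--
-- def count_token(text):
--     token_count = {}
--     tokens = text.split()
--     for token in tokens:
--         token = token.lower().strip().strip(punctuation)
--         if token == ' ':
--             break
--         token_count[token] = token_count.get(token, 0) + 1
--     return token_count
-- ===== SOURCE B (Python) =====
-- from string import punctuation
--
-- def count_token(text):
--     toks = [w.lower().strip().strip(punctuation) for w in text.split()]
--     return {t: toks.count(t) for t in dict.fromkeys(toks)}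
-- ===== Notes on version B (the rewrite author's own statement) =====
-- stated objective: alternative
-- what changed: A accumulates counts in one pass into a dict (with a dead `break` on a one-space token); B first maps the whole split into a list of cleaned tokens, then builds the dict by pairing each first-occurrence-distinct token with toks.count(t).
import Mathlib
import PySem

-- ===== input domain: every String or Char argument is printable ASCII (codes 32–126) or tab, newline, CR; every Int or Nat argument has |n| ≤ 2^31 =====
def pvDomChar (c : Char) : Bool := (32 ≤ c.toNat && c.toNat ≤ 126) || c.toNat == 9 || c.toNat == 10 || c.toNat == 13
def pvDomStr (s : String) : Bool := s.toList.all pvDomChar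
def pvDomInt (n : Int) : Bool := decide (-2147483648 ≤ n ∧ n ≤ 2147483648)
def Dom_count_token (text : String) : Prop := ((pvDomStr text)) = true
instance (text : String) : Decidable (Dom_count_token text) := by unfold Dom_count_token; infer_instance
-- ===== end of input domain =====

-- B replaces A's one-pass dict accumulation (with its dead `break`) by mapping all tokens to
-- cleaned form and pairing each first-occurrence-distinct token with its count (alternative).

-- string.punctuation
def pvPunct : String := "!\"#$%&'()*+,-./:;<=>?@[\\]^_`{|}~"

-- ===== PORT A =====
def countTokenLoop : List String → PySem.Dict String Int → PySem.Dict String Int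
  | [], d => d
  | w :: rest, d =>
    let token := PySem.Str.stripChars (PySem.Str.strip (PySem.Str.lower w)) pvPunct
    if token == " " then d
    else countTokenLoop rest (d.insert token (d.getD token 0 + 1))

def count_token (text : String) : List (String × Int) :=
  (countTokenLoop (PySem.Str.split₀ text) PySem.Dict.empty).items

-- ===== PORT B =====
def count_token_alt (text : String) : List (String × Int) :=
  let toks := (PySem.Str.split₀ text).map
    (fun w => PySem.Str.stripChars (PySem.Str.strip (PySem.Str.lower w)) pvPunct)
  (PySem.List.dedup toks).map (fun t => (t, (PySem.List.count toks t : Int)))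

-- ===== PRECONDITION & SPEC =====
def Spec_count_token (text : String) (out : List (String × Int)) : Prop := out = count_token_alt text
instance (text : String) (out : List (String × Int)) : Decidable (Spec_count_token text out) := by unfold Spec_count_token; infer_instance

-- ===== CLAIM (what is proved, stated in full; the proofs are below) =====
def Claim_equal_count_token : Prop := ∀ (text : String), Dom_count_token text → Spec_count_token text (count_token text)

-- ===== LEMMAS AND PROOFS =====

-- every word produced by text.split() contains no whitespace character
theorem split₀_go_nospace (s : List Char) : ∀ (cur : List Char) (acc : List (List Char)),
    (∀ c ∈ cur, PySem.Chars.isspace c = false) →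
    (∀ w ∈ acc, ∀ c ∈ w, PySem.Chars.isspace c = false) →
    ∀ w ∈ PySem.Chars.split₀.go s cur acc, ∀ c ∈ w, PySem.Chars.isspace c = false := by
  induction s with
  | nil =>
    intro cur acc hcur hacc w hw
    rw [PySem.Chars.split₀.go.eq_def] at hw
    dsimp only at hw
    by_cases hc : cur.isEmpty = true
    · rw [if_pos hc] at hw
      simp only [List.mem_reverse] at hw
      exact hacc w hw
    · rw [if_neg hc] at hw
      simp only [List.mem_reverse, List.mem_cons] at hw
      rcases hw with h | h
      · subst h; intro c hc'; exact hcur c (List.mem_reverse.mp hc')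
      · exact hacc w h
  | cons a t ih =>
    intro cur acc hcur hacc w hw
    rw [PySem.Chars.split₀.go.eq_def] at hw
    dsimp only at hw
    by_cases hs : PySem.Chars.isspace a = true
    · rw [if_pos hs] at hw
      by_cases hc : cur.isEmpty = true
      · rw [if_pos hc] at hw
        exact ih [] acc (by simp) hacc w hw
      · rw [if_neg hc] at hw
        refine ih [] (cur.reverse :: acc) (by simp) ?_ w hw
        intro w' hw' c hc'
        rcases List.mem_cons.mp hw' with h | h
        · subst h; exact hcur c (List.mem_reverse.mp hc')
        · exact hacc w' h c hc'
    · rw [if_neg hs] at hw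
      refine ih (a :: cur) acc ?_ hacc w hw
      intro c hc'
      rcases List.mem_cons.mp hc' with h | h
      · subst h; exact Bool.eq_false_iff.mpr hs
      · exact hcur c h

theorem mem_stripChars_sub {c : Char} {s p : List Char} (h : c ∈ PySem.Chars.stripChars s p) : c ∈ s := by
  unfold PySem.Chars.stripChars at h
  simp only [List.mem_reverse] at h
  have h1 := (List.dropWhile_sublist (l := (List.dropWhile (fun c => p.contains c) s).reverse)
      (p := fun c => p.contains c)).subset h
  rw [List.mem_reverse] at h1
  exact (List.dropWhile_sublist (l := s) (p := fun c => p.contains c)).subset h1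

theorem mem_strip_sub {c : Char} {s : List Char} (h : c ∈ PySem.Chars.strip s) : c ∈ s := by
  unfold PySem.Chars.strip PySem.Chars.rstrip PySem.Chars.lstrip at h
  simp only [List.mem_reverse] at h
  have h1 := (List.dropWhile_sublist (p := PySem.Chars.isspace)).subset h
  rw [List.mem_reverse] at h1
  exact (List.dropWhile_sublist (p := PySem.Chars.isspace)).subset h1

theorem lower_ne_space (c : Char) (h : PySem.Chars.isspace c = false) : PySem.Chars.lowerChar c ≠ ' ' := by
  unfold PySem.Chars.lowerChar
  split
  · rename_i hu
    unfold PySem.Chars.isupper at hu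
    simp only [Bool.and_eq_true, decide_eq_true_eq, Char.le_def] at hu
    have hc : 65 ≤ c.toNat ∧ c.toNat ≤ 90 := ⟨hu.1, hu.2⟩
    intro he
    have hv : Nat.isValidChar (c.toNat + 32) := by left; omega
    have h32 : (Char.ofNat (c.toNat + 32)).toNat = c.toNat + 32 := by
      rw [Char.toNat_ofNat, if_pos hv]
    have h2 : (Char.ofNat (c.toNat + 32)).toNat = 32 := by rw [he]; rfl
    omega
  · intro he
    subst he
    simp [PySem.Chars.isspace] at h

-- a cleaned token is never the one-space string the loop breaks on
theorem clean_ne_space (w : String) (hw : ∀ c ∈ w.toList, PySem.Chars.isspace c = false) :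
    PySem.Str.stripChars (PySem.Str.strip (PySem.Str.lower w)) pvPunct ≠ " " := by
  intro h
  have hmem : ' ' ∈ (PySem.Str.stripChars (PySem.Str.strip (PySem.Str.lower w)) pvPunct).toList := by
    rw [h]; decide
  rw [PySem.Str.toList_stripChars, PySem.Str.toList_strip, PySem.Str.toList_lower] at hmem
  have h1 : ' ' ∈ PySem.Chars.lower w.toList := mem_strip_sub (mem_stripChars_sub hmem)
  unfold PySem.Chars.lower at h1
  rcases List.mem_map.mp h1 with ⟨c, hc, hcl⟩
  exact lower_ne_space c (hw c hc) hcl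

-- once the break can never fire, A's loop is a fold of counter insertions over the cleaned tokens
theorem countTokenLoop_eq (toks : List String)
    (h : ∀ w ∈ toks, ∀ c ∈ w.toList, PySem.Chars.isspace c = false) (d : PySem.Dict String Int) :
    countTokenLoop toks d =
      List.foldl (fun d t => d.insert t (d.getD t 0 + 1)) d
        (toks.map (fun w => PySem.Str.stripChars (PySem.Str.strip (PySem.Str.lower w)) pvPunct)) := by
  induction toks generalizing d with
  | nil => rfl
  | cons w rest ih =>
    have hne : PySem.Str.stripChars (PySem.Str.strip (PySem.Str.lower w)) pvPunct ≠ " " :=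
      clean_ne_space w (h w (List.mem_cons_self))
    simp only [countTokenLoop, List.map_cons, List.foldl_cons, beq_iff_eq, if_neg hne]
    exact ih (fun w' hw' => h w' (List.mem_cons_of_mem _ hw')) _

-- ===== VERDICT (by name: the statement is the Claim_ definition above) =====
theorem count_token_spec : Claim_equal_count_token := by
  intro text _
  unfold Spec_count_token count_token count_token_alt
  have hnospace : ∀ w ∈ PySem.Str.split₀ text, ∀ c ∈ w.toList, PySem.Chars.isspace c = false := by
    intro w hw
    have hmem : w.toList ∈ PySem.Chars.split₀ text.toList := by
      rw [← PySem.Str.split₀_map_toList]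
      exact List.mem_map.mpr ⟨w, hw, rfl⟩
    exact split₀_go_nospace text.toList [] [] (by simp) (by simp) w.toList hmem
  rw [countTokenLoop_eq _ hnospace, PySem.Dict.foldl_insert_getD_add_one_eq_counter,
    PySem.Dict.items_counter]
  simp [PySem.List.dedup_eq_ofList, PySem.List.count_eq]
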